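-- pv_equiv track=rewrite | github.com/htayanloo/htb-network-discovery | src/utils/validators.py | expand_interface
-- ===== SOURCE A (Python) =====
-- def expand_interface(interface: str) -> str:
--     """
--     Expand abbreviated Cisco interface name.
--
--     Args:
--         interface: Abbreviated interface name
--
--     Returns:
--         Full interface name
--     """
--     expansions = {
--         "Gi": "GigabitEthernet",
--         "Te": "TenGigabitEthernet",
--         "Fa": "FastEthernet",
--         "Et": "Ethernet",
--         "Po": "Port-channel",
--         "Vl": "Vlan",
--     }
--
--     for abbr, full in expansions.items():
--         if interface.startswith(abbr):
--             return interface.replace(abbr, full, 1)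
--
--     return interface
-- ===== SOURCE B (Python) =====
-- def expand_interface(interface: str) -> str:
--     """Expand abbreviated Cisco interface name (single dict lookup on the 2-char prefix)."""
--     expansions = {
--         "Gi": "GigabitEthernet",
--         "Te": "TenGigabitEthernet",
--         "Fa": "FastEthernet",
--         "Et": "Ethernet",
--         "Po": "Port-channel",
--         "Vl": "Vlan",
--     }
--     prefix = interface[:2]
--     if prefix in expansions:
--         return expansions[prefix] + interface[2:]
--     return interface
-- ===== Notes on version B (the rewrite author's own statement) =====
-- stated objective: simpler
-- what changed: Replaces the scan over all abbreviations with startswith/replace by a single O(1) dict lookup of the fixed 2-character prefix, concatenating the expansion with the rest of the string.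
import Mathlib
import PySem

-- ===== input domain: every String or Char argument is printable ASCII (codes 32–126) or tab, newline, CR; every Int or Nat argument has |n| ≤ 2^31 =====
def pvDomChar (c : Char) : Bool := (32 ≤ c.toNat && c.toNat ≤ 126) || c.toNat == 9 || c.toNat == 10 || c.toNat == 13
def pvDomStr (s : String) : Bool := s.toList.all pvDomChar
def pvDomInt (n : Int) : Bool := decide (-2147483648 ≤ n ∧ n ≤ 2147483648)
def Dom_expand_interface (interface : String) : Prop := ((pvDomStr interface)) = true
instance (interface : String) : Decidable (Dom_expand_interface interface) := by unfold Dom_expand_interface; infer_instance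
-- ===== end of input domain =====

-- B replaces A's scan over all abbreviations (startswith + replace per key) by one dict lookup of the fixed 2-char prefix; objective: simpler.

-- ===== PORT A =====
-- exact port of Python s.replace(old, new, 1): replace the first occurrence of old, if any
def pyReplace1 (s old new : List Char) : List Char :=
  let i := PySem.Chars.find s old
  if i = -1 then s else s.take i.toNat ++ new ++ s.drop (i.toNat + old.length)

-- the 'for abbr, full in expansions.items(): if interface.startswith(abbr): return …' loop
def expandGo (interface : String) : List (String × String) → String
  | [] => interface
  | (abbr, full) :: rest =>
    if PySem.Str.startswith interface abbr then
      String.mk (pyReplace1 interface.toList abbr.toList full.toList)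
    else expandGo interface rest

def expand_interface (interface : String) : String :=
  let expansions : List (String × String) :=
    [("Gi", "GigabitEthernet"), ("Te", "TenGigabitEthernet"), ("Fa", "FastEthernet"),
     ("Et", "Ethernet"), ("Po", "Port-channel"), ("Vl", "Vlan")]
  expandGo interface expansions

-- ===== PORT B =====
def expand_interface_alt (interface : String) : String :=
  let expansions : PySem.Dict String String :=
    PySem.Dict.ofList
      [("Gi", "GigabitEthernet"), ("Te", "TenGigabitEthernet"), ("Fa", "FastEthernet"),
       ("Et", "Ethernet"), ("Po", "Port-channel"), ("Vl", "Vlan")]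
  let pre := PySem.Str.slice interface none (some 2)
  match expansions.get? pre with
  | some full => full ++ PySem.Str.slice interface (some 2) none
  | none => interface

-- ===== PRECONDITION & SPEC =====
def Spec_expand_interface (interface : String) (out : String) : Prop := out = expand_interface_alt interface
instance (interface : String) (out : String) : Decidable (Spec_expand_interface interface out) := by unfold Spec_expand_interface; infer_instance

-- ===== CLAIM (what is proved, stated in full; the proofs are below) =====
def Claim_equal_expand_interface : Prop := ∀ (interface : String), Dom_expand_interface interface → Spec_expand_interface interface (expand_interface interface)

-- ===== LEMMAS AND PROOFS =====

lemma find_eq_zero_of_prefix (s sub : List Char) (h : sub <+: s) : PySem.Chars.find s sub = 0 := by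
  have h0 : 0 ≤ PySem.Chars.find s sub := (PySem.Chars.find_nonneg_iff s sub).2 h.isInfix
  have hspec := PySem.Chars.find_spec (s := s) (sub := sub) h0
  rcases Nat.eq_zero_or_pos (PySem.Chars.find s sub).toNat with hz | hp
  · omega
  · exact absurd (by simpa using h) (hspec.2 0 hp)

lemma replace1_prefix (s rest new : List Char) : pyReplace1 (s ++ rest) s new = new ++ rest := by
  have hf := find_eq_zero_of_prefix (s ++ rest) s ⟨rest, rfl⟩
  simp [pyReplace1, hf]

lemma slice2_to (xs : List Char) : PySem.List.slice xs none (some 2) = xs.take 2 := by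
  simp [pysem]

lemma slice2_from (xs : List Char) : PySem.List.slice xs (some 2) none = xs.drop 2 := by
  simp [pysem]

-- A's 'interface.startswith(abbr)' and B's 'interface[:2] == abbr' agree for a 2-char abbr
lemma cond_eq (s p : String) (hp : p.toList.length = 2) :
    (p == PySem.Str.slice s none (some 2)) = PySem.Str.startswith s p := by
  rcases Bool.eq_false_or_eq_true (PySem.Str.startswith s p) with h | h <;> rw [h]
  · rw [PySem.Str.startswith_eq, PySem.Chars.startswith_iff, List.prefix_iff_eq_take, hp] at h
    rw [beq_iff_eq, ← String.toList_inj]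
    simpa [slice2_to] using h
  · rw [beq_eq_false_iff_ne]
    intro he
    have ht : PySem.Str.startswith s p = true := by
      rw [PySem.Str.startswith_eq, PySem.Chars.startswith_iff, he]
      simp [slice2_to, List.take_prefix]
    rw [ht] at h
    exact Bool.noConfusion h

-- on a 2-char prefix match, replace(abbr, full, 1) is full + interface[2:]
lemma branch (s p f : String) (hp : p.toList.length = 2)
    (h : PySem.Str.startswith s p = true) :
    String.mk (pyReplace1 s.toList p.toList f.toList) = f ++ PySem.Str.slice s (some 2) none := by
  rw [PySem.Str.startswith_eq, PySem.Chars.startswith_iff] at h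
  obtain ⟨t, ht⟩ := h
  have hdrop : s.toList.drop 2 = t := by rw [← ht, ← hp]; simp
  rw [← ht, replace1_prefix, ← String.toList_inj]
  rw [show ∀ l : List Char, (String.mk l).toList = l from fun l => String.ofList_eq.mp rfl ▸ rfl]
  simp [slice2_from, hdrop]

lemma expand_main (s : String) : expand_interface s = expand_interface_alt s := by
  have hd : (PySem.Dict.ofList
      [("Gi", "GigabitEthernet"), ("Te", "TenGigabitEthernet"), ("Fa", "FastEthernet"),
       ("Et", "Ethernet"), ("Po", "Port-channel"), ("Vl", "Vlan")] : PySem.Dict String String)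
      = PySem.Dict.mk
      [("Gi", "GigabitEthernet"), ("Te", "TenGigabitEthernet"), ("Fa", "FastEthernet"),
       ("Et", "Ethernet"), ("Po", "Port-channel"), ("Vl", "Vlan")] := by decide
  simp only [expand_interface, expand_interface_alt, expandGo, hd, PySem.Dict.get?_mk_cons,
    cond_eq s "Gi" (by decide), cond_eq s "Te" (by decide), cond_eq s "Fa" (by decide),
    cond_eq s "Et" (by decide), cond_eq s "Po" (by decide), cond_eq s "Vl" (by decide)]
  split_ifs with h1 h2 h3 h4 h5 h6
  · exact branch s "Gi" "GigabitEthernet" (by decide) h1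
  · exact branch s "Te" "TenGigabitEthernet" (by decide) h2
  · exact branch s "Fa" "FastEthernet" (by decide) h3
  · exact branch s "Et" "Ethernet" (by decide) h4
  · exact branch s "Po" "Port-channel" (by decide) h5
  · exact branch s "Vl" "Vlan" (by decide) h6
  · simp [PySem.Dict.get?]

-- ===== VERDICT (by name: the statement is the Claim_ definition above) =====
theorem expand_interface_spec : Claim_equal_expand_interface := by
  intro s _
  unfold Spec_expand_interface
  exact expand_main s
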